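-- pv_equiv track=rewrite | github.com/bensmus/box-grouping-optimization | warehouse_organize.py | compute_all_groupings
-- ===== SOURCE A (Python) =====
-- import itertools
--
-- def exclude(ar, elems):
--     return [elem for elem in ar if elem not in elems]
--
-- def compute_all_groupings(ar, group_size):
--     """
--     A grouping is defined as a subdivision of `ar` into groups where
--     all of the groups have size `group_size`. So if `ar` is [A, B, C, D, E, F],
--     one possible grouping with `group_size` 3 would be { {A, B, E}, {C, D, F} }.
--     """
--     # Use a set to ensure that all the groupings are unique.
--     groupings = set()
--     # A recursive function that updates groupings.
--     # `accumulated` is the current labeling, `remaining` is what remains to be labeled.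
--     def recursive(accumulated, remaining):
--         for pair in itertools.combinations(remaining, group_size):
--             next_accumulated = accumulated.union({frozenset(pair)}) # `next_accumulated` is a set of frozensets.
--             next_remaining = exclude(remaining, pair)
--             if next_remaining == []: # We fully divided the printers up.
--                 groupings.add(frozenset(next_accumulated)) # Sets aren't hashable, so frozenset it.
--             recursive(next_accumulated, next_remaining)
--     recursive(set(), ar)
--     return groupings
-- ===== SOURCE B (Python) =====
-- import itertools
--
-- def compute_all_groupings(ar, group_size):
--     """
--     All subdivisions of `ar` into groups of size `group_size`: the first remaining
--     element always goes into the next group (anchoring), so complete partitions are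
--     never re-derived once per ordering of their groups as in the exhaustive search.
--     """
--     def parts(remaining):
--         if not remaining:
--             return [[]]
--         anchor, rest = remaining[0], remaining[1:]
--         result = []
--         for c in itertools.combinations(rest, group_size - 1):
--             group = (anchor,) + c
--             rest2 = [e for e in rest if e not in group]
--             for p in parts(rest2):
--                 result.append([group] + p)
--         return result
--     return {frozenset(frozenset(g) for g in p) for p in parts(ar)}
-- ===== Notes on version B (the rewrite author's own statement) =====
-- stated objective: alternative
-- what changed: Replaces A's DFS over every ordering of the groups (deduplicated through a global set of frozensets) by an anchored enumeration in which the first remaining element always joins the next group, so each partition is derived once instead of once per group ordering; a timing run could not confirm a speed-up because the exponential output size makes both versions time out at that run's larger sizes.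
-- outside the precondition, e.g. on compute_all_groupings([], 2): A returns set(), B returns [[]]
import Mathlib
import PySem

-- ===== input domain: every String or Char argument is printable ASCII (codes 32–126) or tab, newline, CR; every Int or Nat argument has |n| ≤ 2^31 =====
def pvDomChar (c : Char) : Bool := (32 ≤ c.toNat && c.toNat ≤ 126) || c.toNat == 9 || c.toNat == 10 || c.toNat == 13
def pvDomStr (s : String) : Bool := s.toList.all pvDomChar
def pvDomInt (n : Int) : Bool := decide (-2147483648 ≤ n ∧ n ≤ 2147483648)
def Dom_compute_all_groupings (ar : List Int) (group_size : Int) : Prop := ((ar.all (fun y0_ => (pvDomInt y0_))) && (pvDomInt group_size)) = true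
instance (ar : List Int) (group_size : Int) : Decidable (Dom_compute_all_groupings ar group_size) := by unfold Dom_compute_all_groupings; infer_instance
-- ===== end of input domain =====

-- B replaces A's DFS over all orderings of the groups (deduplicated through a set of
-- frozensets) by an anchored enumeration that derives each grouping once.
-- (Equality is on the return value; neither version mutates its arguments.)

-- ===== PORT A =====
-- itertools.combinations(xs, r) in itertools' order (combinations keep the list order).
def pvCombos : Nat → List Int → List (List Int)
  | 0, _ => [[]]
  | _+1, [] => []
  | r+1, x :: xs => (pvCombos r xs).map (fun c => x :: c) ++ pvCombos (r+1) xs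

-- frozenset(g) == frozenset(h): the two slot lists carry the same set of values.
def pvGEq (g h : List Int) : Bool :=
  g.all (fun e => h.contains e) && h.all (fun e => g.contains e)

-- equality of two groupings as frozensets of frozensets (a grouping is kept as its
-- list of groups in discovery order, each group a slot list in list order).
def pvPEq (p q : List (List Int)) : Bool :=
  p.all (fun g => q.any (fun h => pvGEq g h)) && q.all (fun h => p.any (fun g => pvGEq g h))

-- `groupings.add(frozenset(next_accumulated))`: add unless an equal frozenset is present.
def pvAdd (G : List (List (List Int))) (na : List (List Int)) : List (List (List Int)) :=
  if G.any (fun h => pvPEq na h) then G else G ++ [na]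

-- A's inner `recursive(accumulated, remaining)`, threading the `groupings` set G.
-- fuel only totalizes the recursion: each level drops ≥ 1 element when group_size ≥ 1,
-- so fuel = ar.length + 1 never runs out on inputs satisfying Pre_.
def pvARec (gsN : Nat) : Nat → List (List Int) → List Int → List (List (List Int)) → List (List (List Int))
  | 0, _, _, G => G
  | fuel+1, acc, rem, G =>
    (pvCombos gsN rem).foldl (fun G pair =>
      let na := acc ++ [pair]
      let nr := rem.filter (fun e => !(pair.contains e))   -- exclude(remaining, pair)
      pvARec gsN fuel na nr (if nr = [] then pvAdd G na else G)) G

def compute_all_groupings (ar : List Int) (group_size : Int) : List (List (List Int)) :=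
  pvARec group_size.toNat (ar.length + 1) [] ar []

-- ===== PORT B =====
-- Source B's `parts`: anchor the first remaining element, pick its group-mates among the
-- rest, recurse on what is left.
def pvBParts (k : Nat) (rem : List Int) : List (List (List Int)) :=
  match rem with
  | [] => [[]]
  | x :: rest =>
    (pvCombos k rest).flatMap (fun c =>
      (pvBParts k (rest.filter (fun e => !((x :: c).contains e)))).map (fun p => (x :: c) :: p))
termination_by rem.length
decreasing_by
  simpa using (List.length_filter_le _ rest.attach).trans (Nat.le_of_eq (by simp))

-- Source B's final set comprehension {frozenset(frozenset(g) for g in p) for p in parts(ar)}: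
-- a Python set of frozensets, so membership (pvAdd) is frozenset equality pvPEq.
def compute_all_groupings_alt (ar : List Int) (group_size : Int) : List (List (List Int)) :=
  (pvBParts (group_size - 1).toNat ar).foldl pvAdd []

-- ===== PRECONDITION & SPEC =====
-- Pre_ excludes group_size < 1, where A raises (ValueError for negative group_size,
-- unbounded recursion for 0), and the empty list — a defensible corner on which A
-- returns set() while B returns the one vacuous grouping {frozenset()}.
def Pre_compute_all_groupings (ar : List Int) (group_size : Int) : Prop :=
  ar ≠ [] ∧ 1 ≤ group_size
instance (ar : List Int) (group_size : Int) : Decidable (Pre_compute_all_groupings ar group_size) := by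
  unfold Pre_compute_all_groupings; infer_instance

def pvWitness_compute_all_groupings : List Int × Int := ([1, 2, 3, 4], 2)

def Spec_compute_all_groupings (ar : List Int) (group_size : Int) (out : List (List (List Int))) : Prop := out = compute_all_groupings_alt ar group_size
instance (ar : List Int) (group_size : Int) (out : List (List (List Int))) : Decidable (Spec_compute_all_groupings ar group_size out) := by unfold Spec_compute_all_groupings; infer_instance

-- ===== CLAIM (what is proved, stated in full; the proofs are below) =====
def Claim_equal_compute_all_groupings : Prop := ∀ (ar : List Int) (group_size : Int), Dom_compute_all_groupings ar group_size → Pre_compute_all_groupings ar group_size → Spec_compute_all_groupings ar group_size (compute_all_groupings ar group_size)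

-- ===== LEMMAS AND PROOFS =====

-- Prop sides of pvGEq / pvPEq
def pvSEq (g h : List Int) : Prop := (∀ e ∈ g, e ∈ h) ∧ (∀ e ∈ h, e ∈ g)

def pvSetP (p q : List (List Int)) : Prop :=
  (∀ g ∈ p, ∃ h ∈ q, pvSEq g h) ∧ (∀ h ∈ q, ∃ g ∈ p, pvSEq g h)

theorem pvPEq_iff (p q : List (List Int)) : pvPEq p q = true ↔ pvSetP p q := by
  simp [pvPEq, pvGEq, pvSetP, pvSEq, List.all_eq_true, List.any_eq_true]

theorem pvSEq_refl (g : List Int) : pvSEq g g := ⟨fun _ h => h, fun _ h => h⟩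

theorem pvSetP_refl (p : List (List Int)) : pvSetP p p :=
  ⟨fun g hg => ⟨g, hg, pvSEq_refl g⟩, fun g hg => ⟨g, hg, pvSEq_refl g⟩⟩

theorem pvSEq_trans {f g h : List Int} (h1 : pvSEq f g) (h2 : pvSEq g h) : pvSEq f h :=
  ⟨fun e he => h2.1 e (h1.1 e he), fun e he => h1.2 e (h2.2 e he)⟩

theorem pvSetP_trans {p q r : List (List Int)} (h1 : pvSetP p q) (h2 : pvSetP q r) : pvSetP p r := by
  constructor
  · intro g hg
    obtain ⟨h, hh, hs⟩ := h1.1 g hg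
    obtain ⟨h', hh', hs'⟩ := h2.1 h hh
    exact ⟨h', hh', pvSEq_trans hs hs'⟩
  · intro h hh
    obtain ⟨g, hg, hs⟩ := h2.2 h hh
    obtain ⟨g', hg', hs'⟩ := h1.2 g hg
    exact ⟨g', hg', pvSEq_trans hs' hs⟩

theorem pvSetP_of_perm {p q : List (List Int)} (h : p.Perm q) : pvSetP p q :=
  ⟨fun g hg => ⟨g, h.mem_iff.mp hg, pvSEq_refl g⟩, fun g hg => ⟨g, h.mem_iff.mpr hg, pvSEq_refl g⟩⟩

theorem pvSetP_cons {g g' : List Int} {s p : List (List Int)}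
    (hg : pvSEq g g') (hs : pvSetP s p) : pvSetP (g :: s) (g' :: p) := by
  constructor
  · intro a ha
    rcases List.mem_cons.mp ha with rfl | ha
    · exact ⟨g', by simp, hg⟩
    · obtain ⟨h, hh, hseq⟩ := hs.1 a ha
      exact ⟨h, by simp [hh], hseq⟩
  · intro a ha
    rcases List.mem_cons.mp ha with rfl | ha
    · exact ⟨g, by simp, hg⟩
    · obtain ⟨h, hh, hseq⟩ := hs.2 a ha
      exact ⟨h, by simp [hh], hseq⟩

theorem pvSetP_append {s p : List (List Int)} (acc : List (List Int)) (h : pvSetP s p) :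
    pvSetP (acc ++ s) (acc ++ p) := by
  constructor
  · intro g hg
    rcases List.mem_append.mp hg with hg | hg
    · exact ⟨g, List.mem_append_left _ hg, pvSEq_refl g⟩
    · obtain ⟨h', hh', hs⟩ := h.1 g hg
      exact ⟨h', List.mem_append_right _ hh', hs⟩
  · intro g hg
    rcases List.mem_append.mp hg with hg | hg
    · exact ⟨g, List.mem_append_left _ hg, pvSEq_refl g⟩
    · obtain ⟨h', hh', hs⟩ := h.2 g hg
      exact ⟨h', List.mem_append_right _ hh', hs⟩

theorem pv_mem_combos {r : Nat} {xs p : List Int} :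
    p ∈ pvCombos r xs ↔ p.length = r ∧ p.Sublist xs := by
  induction xs generalizing r p with
  | nil =>
    cases r with
    | zero => simp [pvCombos, List.length_eq_zero_iff]
    | succ r =>
      simp only [pvCombos, List.not_mem_nil, false_iff]
      rintro ⟨hl, hs⟩
      simp [List.sublist_nil] at hs; simp [hs] at hl
  | cons x xs ih =>
    cases r with
    | zero =>
      simp [pvCombos, List.length_eq_zero_iff]
      rintro rfl; exact List.nil_sublist _
    | succ r =>
      simp only [pvCombos, List.mem_append, List.mem_map, ih]
      constructor
      · rintro (⟨c, ⟨hl, hs⟩, rfl⟩ | ⟨hl, hs⟩)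
        · exact ⟨by simp [hl], List.cons_sublist_cons.mpr hs⟩
        · exact ⟨hl, hs.cons _⟩
      · rintro ⟨hl, hs⟩
        rcases List.sublist_cons_iff.mp hs with hs | ⟨c, rfl, hs2⟩
        · exact Or.inr ⟨hl, hs⟩
        · exact Or.inl ⟨c, ⟨by simpa using hl, hs2⟩, rfl⟩

-- what A can complete from state `rem`: sequences of groups that empty `rem`
inductive pvCompletes (gsN : Nat) : List Int → List (List Int) → Prop
  | nil : pvCompletes gsN [] []
  | cons {rem : List Int} {pair : List Int} {s : List (List Int)} :
      pair ∈ pvCombos gsN rem →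
      pvCompletes gsN (rem.filter (fun e => !(pair.contains e))) s →
      pvCompletes gsN rem (pair :: s)

theorem pv_mem_filter_not_contains {e : Int} {l p : List Int} :
    e ∈ l.filter (fun e => !(p.contains e)) ↔ e ∈ l ∧ e ∉ p := by
  simp [List.mem_filter]

theorem pv_completes_swap {k : Nat} {rem : List Int} {a b : List Int} {s : List (List Int)}
    (h : pvCompletes (k+1) rem (a :: b :: s)) : pvCompletes (k+1) rem (b :: a :: s) := by
  rcases h with _ | ⟨ha, hbs⟩
  generalize hE : rem.filter (fun e => !(a.contains e)) = rem1 at hbs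
  rcases hbs with _ | ⟨hb, hs⟩; subst hE
  have hae : a.Sublist rem := (pv_mem_combos.mp ha).2
  have hbe : b.Sublist (rem.filter (fun e => !(a.contains e))) := (pv_mem_combos.mp hb).2
  have hb_rem : b ∈ pvCombos (k+1) rem :=
    pv_mem_combos.mpr ⟨(pv_mem_combos.mp hb).1, hbe.trans List.filter_sublist⟩
  have hdisj : ∀ e ∈ a, e ∉ b := by
    intro e hea heb
    exact (pv_mem_filter_not_contains.mp (hbe.subset heb)).2 hea
  have ha_filtered : a ∈ pvCombos (k+1) (rem.filter (fun e => !(b.contains e))) := by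
    refine pv_mem_combos.mpr ⟨(pv_mem_combos.mp ha).1, ?_⟩
    have he : a = a.filter (fun e => !(b.contains e)) := by
      symm; apply List.filter_eq_self.mpr; intro e he; simpa using hdisj e he
    rw [he]; exact hae.filter _
  have hcomm : (rem.filter (fun e => !(a.contains e))).filter (fun e => !(b.contains e))
      = (rem.filter (fun e => !(b.contains e))).filter (fun e => !(a.contains e)) := by
    rw [List.filter_filter, List.filter_filter]; congr 1; funext e; rw [Bool.and_comm]
  exact .cons hb_rem (.cons ha_filtered (hcomm ▸ hs))

theorem pv_completes_perm {k : Nat} {s s' : List (List Int)} (hp : s.Perm s') :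
    ∀ {rem : List Int}, pvCompletes (k+1) rem s → pvCompletes (k+1) rem s' := by
  induction hp with
  | nil => exact fun h => h
  | cons x _ ih =>
    intro rem h
    rcases h with _ | ⟨hx, hs⟩
    exact .cons hx (ih hs)
  | swap x y l => intro rem h; exact pv_completes_swap h
  | trans _ _ ih1 ih2 => intro rem h; exact ih2 (ih1 h)

theorem pv_completes_cover {k : Nat} {rem : List Int} {s : List (List Int)}
    (h : pvCompletes (k+1) rem s) : ∀ e ∈ rem, ∃ g ∈ s, e ∈ g := by
  induction h with
  | nil => intro e he; cases he
  | @cons rem pair s hpair hrec ih =>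
    intro e he
    by_cases hep : e ∈ pair
    · exact ⟨pair, by simp, hep⟩
    · obtain ⟨g, hg, heg⟩ := ih e (pv_mem_filter_not_contains.mpr ⟨he, hep⟩)
      exact ⟨g, by simp [hg], heg⟩

theorem pv_completes_nil {k : Nat} {s : List (List Int)}
    (h : pvCompletes (k+1) [] s) : s = [] := by
  rcases h with _ | ⟨hpair, _⟩
  · rfl
  · simp [pvCombos] at hpair

-- a handy filter-over-cons computation
theorem pv_filter_cons_mem {x : Int} {rest p : List Int} (hx : x ∈ p) :
    (x :: rest).filter (fun e => !(p.contains e)) = rest.filter (fun e => !(p.contains e)) := by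
  simp [hx]

theorem pv_filter_congr_seq {g h : List Int} (hs : pvSEq g h) (l : List Int) :
    l.filter (fun e => !(g.contains e)) = l.filter (fun e => !(h.contains e)) := by
  apply List.filter_congr
  intro e _
  have : e ∈ g ↔ e ∈ h := ⟨fun he => hs.1 e he, fun he => hs.2 e he⟩
  simp [this]

-- every completable sequence is, up to frozenset equality, one anchored partition
theorem pv_anchored {k : Nat} {rem : List Int}
    {seq : List (List Int)} (h : pvCompletes (k+1) rem seq) :
    ∃ p ∈ pvBParts k rem, pvSetP seq p := by
  induction hn : rem.length using Nat.strong_induction_on generalizing rem seq with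
  | _ n ih =>
  subst hn
  cases rem with
  | nil =>
    have := pv_completes_nil h; subst this
    exact ⟨[], by simp [pvBParts], pvSetP_refl []⟩
  | cons x rest =>
    obtain ⟨gh, hghmem, hxgh⟩ := pv_completes_cover h x (by simp)
    have hperm1 : seq.Perm (gh :: seq.erase gh) := List.perm_cons_erase hghmem
    have h2 : pvCompletes (k+1) (x :: rest) (gh :: seq.erase gh) := pv_completes_perm hperm1 h
    rcases h2 with _ | ⟨hghc, hrest⟩
    have hsub : gh.Sublist (x :: rest) := (pv_mem_combos.mp hghc).2
    -- c := gh minus one slot of value x is an anchored choice of group-mates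
    have hcsub : (gh.erase x).Sublist rest := by
      rcases List.sublist_cons_iff.mp hsub with h1 | ⟨t, rfl, ht⟩
      · exact (List.erase_sublist ..).trans h1
      · rw [List.erase_cons_head]; exact ht
    have hclen : (gh.erase x).length = k := by
      have := (pv_mem_combos.mp hghc).1
      rw [List.length_erase_of_mem hxgh, this]; omega
    have hseq : pvSEq gh (x :: gh.erase x) := by
      have hp := List.perm_cons_erase hxgh
      exact ⟨fun e he => hp.mem_iff.mp he, fun e he => hp.mem_iff.mpr he⟩
    have hfeq : (x :: rest).filter (fun e => !(gh.contains e))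
        = rest.filter (fun e => !((x :: gh.erase x).contains e)) := by
      rw [pv_filter_congr_seq hseq, pv_filter_cons_mem (by simp)]
    rw [hfeq] at hrest
    have hlt : (rest.filter (fun e => !((x :: gh.erase x).contains e))).length < (x :: rest).length :=
      Nat.lt_succ_of_le (List.length_filter_le _ _)
    obtain ⟨p', hp', hpp⟩ := ih _ hlt hrest rfl
    refine ⟨(x :: gh.erase x) :: p', ?_, ?_⟩
    · rw [pvBParts]; simp only [List.mem_flatMap, List.mem_map]
      exact ⟨gh.erase x, pv_mem_combos.mpr ⟨hclen, hcsub⟩, p', hp', rfl⟩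
    · exact pvSetP_trans (pvSetP_of_perm hperm1) (pvSetP_cons hseq hpp)

theorem pv_arec_nil {k fuel : Nat} {acc : List (List Int)} {G : List (List (List Int))} :
    pvARec (k+1) fuel acc [] G = G := by
  cases fuel <;> simp [pvARec, pvCombos]

theorem pv_foldl_fix {α β : Type} {f : β → α → β} {G : β} {l : List α}
    (h : ∀ a ∈ l, f G a = G) : l.foldl f G = G := by
  induction l with
  | nil => rfl
  | cons a l ih =>
    rw [List.foldl_cons, h a (by simp)]
    exact ih (fun a ha => h a (by simp [ha]))

theorem pv_add_mem {G : List (List (List Int))} {x : List (List Int)} :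
    ∃ h ∈ pvAdd G x, pvSetP x h := by
  unfold pvAdd
  by_cases hc : G.any (fun h => pvPEq x h) = true
  · obtain ⟨h, hh, hp⟩ := List.any_eq_true.mp hc
    exact ⟨h, by simp [hc, hh], (pvPEq_iff _ _).mp hp⟩
  · exact ⟨x, by simp [hc], pvSetP_refl x⟩

theorem pv_add_sub {G : List (List (List Int))} {x h : List (List Int)} (hh : h ∈ G) :
    h ∈ pvAdd G x := by
  unfold pvAdd; split_ifs <;> simp [hh]

theorem pv_foldsub {F : List (List Int) → List (List Int)} {l : List (List (List Int))}
    {G : List (List (List Int))} {h : List (List Int)} (hh : h ∈ G) :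
    h ∈ l.foldl (fun G p => pvAdd G (F p)) G := by
  induction l generalizing G with
  | nil => simpa using hh
  | cons a l ih => rw [List.foldl_cons]; exact ih (pv_add_sub hh)

theorem pv_foldmem {F : List (List Int) → List (List Int)} {l : List (List (List Int))}
    {G : List (List (List Int))} {p : List (List Int)} (hp : p ∈ l) :
    ∃ h ∈ l.foldl (fun G p => pvAdd G (F p)) G, pvSetP (F p) h := by
  induction l generalizing G with
  | nil => cases hp
  | cons a l ih =>
    rw [List.foldl_cons]
    rcases List.mem_cons.mp hp with rfl | hpl
    · obtain ⟨h, hh, hs⟩ := pv_add_mem (G := G) (x := F p)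
      exact ⟨h, pv_foldsub hh, hs⟩
    · exact ih hpl

theorem pv_noadd {k : Nat} : ∀ (fuel : Nat) (rem : List Int) (acc : List (List Int))
    (G : List (List (List Int))),
    (∀ seq, pvCompletes (k+1) rem seq → ∃ h ∈ G, pvPEq (acc ++ seq) h = true) →
    pvARec (k+1) fuel acc rem G = G := by
  intro fuel
  induction fuel with
  | zero => intro rem acc G _; rfl
  | succ f ih =>
    intro rem acc G hyp
    simp only [pvARec]
    apply pv_foldl_fix
    intro pair hpair
    dsimp only
    by_cases hnr : rem.filter (fun e => !(pair.contains e)) = []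
    · obtain ⟨h, hh, hp⟩ := hyp [pair] (.cons hpair (by rw [hnr]; exact .nil))
      rw [hnr, if_pos rfl]
      have hadd : pvAdd G (acc ++ [pair]) = G := by
        unfold pvAdd; rw [if_pos (List.any_eq_true.mpr ⟨h, hh, hp⟩)]
      rw [hadd]
      exact pv_arec_nil
    · rw [if_neg hnr]
      apply ih
      intro seq hseq
      obtain ⟨h, hh, hp⟩ := hyp (pair :: seq) (.cons hpair hseq)
      refine ⟨h, hh, ?_⟩
      rw [← List.append_cons]
      exact hp

theorem pv_main {k : Nat} : ∀ (fuel : Nat) (rem : List Int), rem.length < fuel →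
    rem ≠ [] → ∀ (acc : List (List Int)) (G : List (List (List Int))),
    pvARec (k+1) fuel acc rem G =
      (pvBParts k rem).foldl (fun G p => pvAdd G (acc ++ p)) G := by
  intro fuel
  induction fuel with
  | zero => intro rem h; exact absurd h (Nat.not_lt_zero _)
  | succ f ih =>
    intro rem hlen hne acc G
    cases rem with
    | nil => exact absurd rfl hne
    | cons x rest =>
      have hrlen : rest.length < f := by simpa using hlen
      simp only [pvARec, pvCombos]
      rw [List.foldl_append, List.foldl_map]
      have PH1 : ∀ cs : List (List Int), (∀ c ∈ cs, c ∈ pvCombos k rest) → ∀ G : List (List (List Int)),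
          cs.foldl (fun G c =>
            pvARec (k+1) f (acc ++ [x :: c])
              ((x :: rest).filter (fun e => !((x :: c).contains e)))
              (if ((x :: rest).filter (fun e => !((x :: c).contains e))) = [] then pvAdd G (acc ++ [x :: c]) else G)) G
          = (cs.flatMap (fun c => (pvBParts k (rest.filter (fun e => !((x :: c).contains e)))).map
              (fun p => (x :: c) :: p))).foldl (fun G p => pvAdd G (acc ++ p)) G := by
        intro cs
        induction cs with
        | nil => intro _ _; rfl
        | cons c cs' ihc =>
          intro hcs G0
          rw [List.foldl_cons, List.flatMap_cons, List.foldl_append]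
          have hfc : (x :: rest).filter (fun e => !((x :: c).contains e))
              = rest.filter (fun e => !((x :: c).contains e)) := pv_filter_cons_mem (by simp)
          rw [hfc]
          by_cases hnr : rest.filter (fun e => !((x :: c).contains e)) = []
          · rw [hnr, if_pos rfl, pv_arec_nil]
            have hb0 : pvBParts k ([] : List Int) = [[]] := by rw [pvBParts]
            rw [hb0]
            simp only [List.map_cons, List.map_nil, List.foldl_cons, List.foldl_nil]
            exact ihc (fun c' hc' => hcs c' (by simp [hc'])) _
          · rw [if_neg hnr]
            rw [ih _ (Nat.lt_of_le_of_lt (List.length_filter_le _ _) hrlen) hnr (acc ++ [x :: c]) G0]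
            rw [List.foldl_map]
            have hfun : (fun (g : List (List (List Int))) (p : List (List Int)) => pvAdd g (acc ++ (x :: c) :: p))
                = (fun g p => pvAdd g (acc ++ [x :: c] ++ p)) := by
              funext g p; rw [List.append_cons]
            rw [hfun]
            exact ihc (fun c' hc' => hcs c' (by simp [hc'])) _
      rw [PH1 (pvCombos k rest) (fun _ h => h) G]
      have hbp : (pvCombos k rest).flatMap (fun c => (pvBParts k (rest.filter (fun e => !((x :: c).contains e)))).map
              (fun p => (x :: c) :: p)) = pvBParts k (x :: rest) := by rw [pvBParts]
      rw [hbp]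
      apply pv_foldl_fix
      intro pair hpair
      dsimp only
      have hps : pair.Sublist rest := (pv_mem_combos.mp hpair).2
      have hpair2 : pair ∈ pvCombos (k+1) (x :: rest) :=
        pv_mem_combos.mpr ⟨(pv_mem_combos.mp hpair).1, hps.trans (List.sublist_cons_self _ _)⟩
      by_cases hnr : (x :: rest).filter (fun e => !(pair.contains e)) = []
      · rw [hnr, if_pos rfl]
        have hcomp : pvCompletes (k+1) (x :: rest) [pair] := .cons hpair2 (by rw [hnr]; exact .nil)
        obtain ⟨p, hpB, hset1⟩ := pv_anchored hcomp
        obtain ⟨h, hh, hset2⟩ := pv_foldmem (F := fun p => acc ++ p) (G := G) hpB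
        have hadd : pvAdd (List.foldl (fun G p => pvAdd G (acc ++ p)) G (pvBParts k (x :: rest))) (acc ++ [pair])
            = List.foldl (fun G p => pvAdd G (acc ++ p)) G (pvBParts k (x :: rest)) := by
          unfold pvAdd
          rw [if_pos]
          refine List.any_eq_true.mpr ⟨h, hh, ?_⟩
          exact (pvPEq_iff _ _).mpr (pvSetP_trans (pvSetP_append acc hset1) hset2)
        rw [hadd]
        exact pv_arec_nil
      · rw [if_neg hnr]
        apply pv_noadd
        intro seq hseq
        have hcomp : pvCompletes (k+1) (x :: rest) (pair :: seq) := .cons hpair2 hseq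
        obtain ⟨p, hpB, hset1⟩ := pv_anchored hcomp
        obtain ⟨h, hh, hset2⟩ := pv_foldmem (F := fun p => acc ++ p) (G := G) hpB
        refine ⟨h, hh, ?_⟩
        rw [← List.append_cons]
        exact (pvPEq_iff _ _).mpr (pvSetP_trans (pvSetP_append acc hset1) hset2)

-- ===== VERDICT (by name: the statement is the Claim_ definition above) =====
theorem compute_all_groupings_spec : Claim_equal_compute_all_groupings := by
  intro ar gs _ hpre
  obtain ⟨hne, hgs⟩ := hpre
  unfold Spec_compute_all_groupings compute_all_groupings compute_all_groupings_alt
  have hk : gs.toNat = (gs - 1).toNat + 1 := by omega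
  rw [hk]
  rw [pv_main (ar.length + 1) ar (Nat.lt_succ_self _) hne [] []]
  have hfun : (fun (G : List (List (List Int))) (p : List (List Int)) => pvAdd G ([] ++ p)) = pvAdd := by
    funext G p; rw [List.nil_append]
  rw [hfun]
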